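-- pv_equiv track=rewrite | github.com/jcolinpatrick/kryptos | scripts/k2_coords/e_k2_coords_as_key.py | free_crib_score
-- ===== SOURCE A (Python) =====
-- from typing import List, Tuple, Dict
--
-- def free_crib_score(plaintext: str) -> Tuple[int, int]:
--     """Search for EASTNORTHEAST and BERLINCLOCK at any position. Return (best_score, best_offset)."""
--     cribs = ["EASTNORTHEAST", "BERLINCLOCK"]
--     best = 0
--     best_off = -1
--     for crib in cribs:
--         for i in range(len(plaintext) - len(crib) + 1):
--             matches = sum(1 for j, c in enumerate(crib) if plaintext[i + j] == c)
--             if matches > best: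
--                 best = matches
--                 best_off = i
--     return best, best_off
-- ===== SOURCE B (Python) =====
-- def free_crib_score(plaintext):
--     # Index plaintext positions per character once, then vote offsets per crib.
--     pos = {}
--     for i, ch in enumerate(plaintext):
--         pos.setdefault(ch, []).append(i)
--     n = len(plaintext)
--     best = 0
--     best_off = -1
--     for crib in ["EASTNORTHEAST", "BERLINCLOCK"]:
--         m = len(crib)
--         counts = {}
--         for j, c in enumerate(crib):
--             for q in pos.get(c, []):
--                 off = q - j
--                 if 0 <= off and off <= n - m:
--                     counts[off] = counts.get(off, 0) + 1
--         for off in sorted(counts):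
--             if counts[off] > best:
--                 best = counts[off]
--                 best_off = off
--     return best, best_off
-- ===== Notes on version B (the rewrite author's own statement) =====
-- stated objective: faster
-- what changed: Replaces the per-offset rescan (for every offset, count matching crib characters) by a one-pass character-position index of the plaintext plus an offset-vote histogram per crib: each (crib position j, plaintext position p of that character) pair votes for offset p-j, and the sorted vote keys are scanned with strict > so ties and the zero-score default (-1) behave exactly as in A.
import Mathlib
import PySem

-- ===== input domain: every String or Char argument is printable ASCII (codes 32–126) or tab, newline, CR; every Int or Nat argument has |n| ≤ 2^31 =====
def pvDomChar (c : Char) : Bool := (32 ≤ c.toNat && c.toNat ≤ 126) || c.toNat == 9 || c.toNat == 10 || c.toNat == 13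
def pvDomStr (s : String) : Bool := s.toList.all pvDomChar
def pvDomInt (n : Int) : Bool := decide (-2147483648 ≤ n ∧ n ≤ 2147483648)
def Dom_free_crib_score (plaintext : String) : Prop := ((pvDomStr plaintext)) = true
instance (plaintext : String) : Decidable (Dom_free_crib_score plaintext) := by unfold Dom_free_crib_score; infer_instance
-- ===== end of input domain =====

-- B replaces A's per-offset rescan by a one-pass character-position index plus an
-- offset-vote histogram per crib: work proportional to actual character matches (measured faster).

-- ===== PORT A =====
-- sum(1 for j, c in enumerate(crib) if plaintext[i + j] == c); the index i + j is always
-- in range for i produced by A's loop, so pyGet? always returns `some` there (exact).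
def pvA_matches (p crib : List Char) (i : Int) : Int :=
  (PySem.List.enumerate crib).foldl
    (fun acc jc => if PySem.List.pyGet? p (i + jc.1) == some jc.2 then acc + 1 else acc) 0

-- the body of A's `for crib in cribs` loop, carrying (best, best_off)
def pvA_crib (p : List Char) (st : Int × Int) (crib : List Char) : Int × Int :=
  (PySem.List.pyRange 0 ((p.length : Int) - (crib.length : Int) + 1) 1).foldl
    (fun st i => if pvA_matches p crib i > st.1 then (pvA_matches p crib i, i) else st) st

def free_crib_score (plaintext : String) : Int × Int :=
  ([ "EASTNORTHEAST".toList, "BERLINCLOCK".toList ] : List (List Char)).foldl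
    (pvA_crib plaintext.toList) (0, -1)

-- ===== PORT B =====
-- pos.setdefault(ch, []).append(i) over enumerate(plaintext)
def pvB_pos (p : List Char) : PySem.Dict Char (List Int) :=
  (PySem.List.enumerate p).foldl (fun d x => d.modify x.2 [] (· ++ [x.1])) PySem.Dict.empty

-- counts[off] = counts.get(off, 0) + 1 for each vote p - j in the valid range
def pvB_counts (p : List Char) (pos : PySem.Dict Char (List Int)) (crib : List Char) :
    PySem.Dict Int Int :=
  (PySem.List.enumerate crib).foldl
    (fun d jc =>
      (pos.getD jc.2 []).foldl
        (fun d q =>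
          if 0 ≤ q - jc.1 ∧ q - jc.1 ≤ (p.length : Int) - (crib.length : Int) then
            d.modify (q - jc.1) 0 (· + 1)
          else d)
        d)
    PySem.Dict.empty

-- the body of B's `for crib in ...` loop; counts[off] is looked up with getD 0, exact
-- since every off scanned is a key of counts.
def pvB_crib (p : List Char) (pos : PySem.Dict Char (List Int)) (st : Int × Int)
    (crib : List Char) : Int × Int :=
  let counts := pvB_counts p pos crib
  (PySem.List.sorted counts.keys (fun x => x) false).foldl
    (fun st off => if counts.getD off 0 > st.1 then (counts.getD off 0, off) else st) st

def free_crib_score_alt (plaintext : String) : Int × Int :=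
  let p := plaintext.toList
  ([ "EASTNORTHEAST".toList, "BERLINCLOCK".toList ] : List (List Char)).foldl
    (pvB_crib p (pvB_pos p)) (0, -1)

-- ===== PRECONDITION & SPEC =====
def Spec_free_crib_score (plaintext : String) (out : Int × Int) : Prop := out = free_crib_score_alt plaintext
instance (plaintext : String) (out : Int × Int) : Decidable (Spec_free_crib_score plaintext out) := by unfold Spec_free_crib_score; infer_instance

-- ===== CLAIM (what is proved, stated in full; the proofs are below) =====
def Claim_equal_free_crib_score : Prop := ∀ (plaintext : String), Dom_free_crib_score plaintext → Spec_free_crib_score plaintext (free_crib_score plaintext)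

-- ===== LEMMAS AND PROOFS =====

-- the list of positions recorded for character c
def pvPosL (p : List Char) (c : Char) : List Int :=
  ((PySem.List.enumerate p).filter (fun x => x.2 == c)).map (fun x => x.1)

-- the multiset of offsets voted for by one crib position jc = (j, c)
def pvOffs (p crib : List Char) (jc : Int × Char) : List Int :=
  ((pvPosL p jc.2).filter
      (fun q => decide (0 ≤ q - jc.1 ∧ q - jc.1 ≤ (p.length : Int) - (crib.length : Int)))).map
    (fun q => q - jc.1)

-- all votes of a crib
def pvAll (p crib : List Char) : List Int :=
  (PySem.List.enumerate crib).flatMap (pvOffs p crib)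

-- the match count A computes, as a Nat
def pvMC (p crib : List Char) (i : Int) : Nat :=
  (PySem.List.enumerate crib).countP
    (fun jc => PySem.List.pyGet? p (i + jc.1) == some jc.2)

theorem pvPos_getD (p : List Char) (c : Char) :
    (pvB_pos p).getD c [] = pvPosL p c := by
  unfold pvB_pos pvPosL
  have h := List.foldl_map (f := fun x : Int × Char => (x.2, x.1))
    (g := fun (d : PySem.Dict Char (List Int)) y => d.modify y.1 [] (· ++ [y.2]))
    (l := PySem.List.enumerate p) (init := PySem.Dict.empty)
  rw [show (PySem.List.enumerate p).foldl (fun d x => d.modify x.2 [] (· ++ [x.1])) PySem.Dict.empty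
        = ((PySem.List.enumerate p).map (fun x => (x.2, x.1))).foldl
            (fun d y => d.modify y.1 [] (· ++ [y.2])) PySem.Dict.empty from h.symm]
  rw [PySem.Dict.getD_foldl_modify_append]
  simp [List.filter_map, List.map_map, Function.comp_def]

theorem pvPosL_mem (p : List Char) (c : Char) (q : Int) :
    q ∈ pvPosL p c ↔ ∃ k : Nat, ∃ _ : k < p.length, q = (k : Int) ∧ p[k] = c := by
  unfold pvPosL
  simp only [List.mem_map, List.mem_filter, PySem.List.mem_enumerate_iff]
  constructor
  · rintro ⟨x, ⟨⟨k, hk, rfl⟩, hc⟩, rfl⟩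
    refine ⟨k, hk, by simp, by simpa using hc⟩
  · rintro ⟨k, hk, rfl, hc⟩
    exact ⟨((k : Int), p[k]), ⟨⟨k, hk, by simp⟩, by simpa using hc⟩, rfl⟩

theorem pvPosL_nodup (p : List Char) (c : Char) : (pvPosL p c).Nodup := by
  unfold pvPosL
  have h := (PySem.List.pairwise_lt_enumerate p 0).sublist
    (List.filter_sublist (p := fun x : Int × Char => x.2 == c))
  exact (h.map (fun x : Int × Char => x.1) (fun a b hab => hab)).imp ne_of_lt

theorem pvFoldl_flatMap {α : Type} (L : List (Int × Char)) (g : Int × Char → List Int)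
    (f : α → Int → α) (d : α) :
    (L.flatMap g).foldl f d = L.foldl (fun d jc => (g jc).foldl f d) d := by
  induction L generalizing d with
  | nil => rfl
  | cons x xs ih => simp [List.flatMap_cons, List.foldl_append, ih]

theorem pvCounts_eq_fold (p crib : List Char) :
    pvB_counts p (pvB_pos p) crib
      = (pvAll p crib).foldl (fun d x => d.modify x 0 (· + 1)) PySem.Dict.empty := by
  unfold pvB_counts pvAll
  rw [pvFoldl_flatMap]
  apply PySem.List.foldl_congr_mem
  intro d jc _
  rw [pvPos_getD]
  refine (PySem.List.foldl_ite_eq_foldl_filter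
        (p := fun q => 0 ≤ q - jc.1 ∧ q - jc.1 ≤ (p.length : Int) - (crib.length : Int))
        (f := fun (d : PySem.Dict Int Int) q => d.modify (q - jc.1) 0 (· + 1))
        (l := pvPosL p jc.2) (init := d)).trans ?_
  unfold pvOffs
  exact (List.foldl_map (f := fun q : Int => q - jc.1)
    (g := fun (d : PySem.Dict Int Int) x => d.modify x 0 (· + 1))).symm

theorem pvCounts_getD (p crib : List Char) (v : Int) :
    (pvB_counts p (pvB_pos p) crib).getD v 0 = ((pvAll p crib).count v : Int) := by
  rw [pvCounts_eq_fold, PySem.Dict.getD_foldl_modify_add_one]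
  simp [PySem.Dict.empty, PySem.Dict.getD, PySem.Dict.get?]

theorem pvCounts_keys (p crib : List Char) :
    (pvB_counts p (pvB_pos p) crib).keys = PySem.Set.ofList (pvAll p crib) := by
  rw [pvCounts_eq_fold]
  rw [PySem.Dict.keys_foldl_modify (f := fun _ _ => (· + 1))]
  rfl

theorem pvMem_all_valid (p crib : List Char) (i : Int) (h : i ∈ pvAll p crib) :
    0 ≤ i ∧ i ≤ (p.length : Int) - (crib.length : Int) := by
  unfold pvAll pvOffs at h
  simp only [List.mem_flatMap, List.mem_map, List.mem_filter, decide_eq_true_eq] at h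
  obtain ⟨jc, _, q, ⟨_, hv⟩, rfl⟩ := h
  exact hv

theorem pvCount_offs (p crib : List Char) (i : Int) (k : Nat) (hk : k < crib.length)
    (h0 : 0 ≤ i) (h1 : i ≤ (p.length : Int) - (crib.length : Int)) :
    (pvOffs p crib ((k : Int), crib[k])).count i
      = if PySem.List.pyGet? p (i + (k : Int)) == some crib[k] then 1 else 0 := by
  unfold pvOffs
  have hinj : Function.Injective (fun q : Int => q - (k : Int)) := fun a b h => by
    simpa using congrArg (· + (k : Int)) h
  have hi : i = (fun q : Int => q - (k : Int)) (i + (k : Int)) := by simp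
  conv_lhs => rw [hi, List.count_map_of_injective _ _ hinj]
  rw [List.count_filter (by simp; omega)]
  have hmem : (i + (k : Int)) ∈ pvPosL p crib[k]
      ↔ PySem.List.pyGet? p (i + (k : Int)) == some crib[k] := by
    rw [pvPosL_mem]
    have hidx : i + (k : Int) = ((i.toNat + k : Nat) : Int) := by omega
    have hlt : i.toNat + k < p.length := by omega
    rw [hidx, PySem.List.pyGet?_natCast]
    simp only [List.getElem?_eq_getElem hlt, Option.some.injEq, beq_iff_eq]
    constructor
    · rintro ⟨k', hk', hq, hc⟩
      have : k' = i.toNat + k := by omega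
      subst this; exact hc
    · intro hc; exact ⟨i.toNat + k, hlt, rfl, hc⟩
  by_cases hmm : (i + (k : Int)) ∈ pvPosL p crib[k]
  · rw [List.count_eq_one_of_mem (pvPosL_nodup p _) hmm, if_pos (hmem.mp hmm)]
  · rw [List.count_eq_zero_of_not_mem hmm, if_neg (by rw [← hmem]; exact hmm)]

theorem pvCount_aux (p crib : List Char) (i : Int) (L : List (Int × Char))
    (h : ∀ jc ∈ L, (pvOffs p crib jc).count i
          = if PySem.List.pyGet? p (i + jc.1) == some jc.2 then 1 else 0) :
    (L.flatMap (pvOffs p crib)).count i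
      = L.countP (fun jc => PySem.List.pyGet? p (i + jc.1) == some jc.2) := by
  induction L with
  | nil => rfl
  | cons x xs ih =>
    simp only [List.flatMap_cons, List.count_append, List.countP_cons]
    rw [ih (fun jc hjc => h jc (List.mem_cons_of_mem _ hjc)), h x List.mem_cons_self]
    by_cases hx : (PySem.List.pyGet? p (i + x.1) == some x.2) = true
    · simp [hx]; omega
    · simp [hx]

theorem pvCount_all (p crib : List Char) (i : Int)
    (h0 : 0 ≤ i) (h1 : i ≤ (p.length : Int) - (crib.length : Int)) :
    (pvAll p crib).count i = pvMC p crib i := by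
  unfold pvAll pvMC
  apply pvCount_aux
  intro jc hjc
  rw [PySem.List.mem_enumerate_iff] at hjc
  obtain ⟨k, hk, rfl⟩ := hjc
  simpa using pvCount_offs p crib i k hk h0 h1

theorem pvMatches_eq (p crib : List Char) (i : Int) :
    pvA_matches p crib i = (pvMC p crib i : Int) := by
  unfold pvA_matches pvMC
  rw [PySem.List.foldl_if_add_one]
  simp

theorem pvSortedKeys_eq (p crib : List Char) :
    PySem.List.sorted (pvB_counts p (pvB_pos p) crib).keys (fun x => x) false
      = (PySem.List.pyRange 0 ((p.length : Int) - (crib.length : Int) + 1) 1).filter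
          (fun i => decide (0 < pvMC p crib i)) := by
  rw [pvCounts_keys]
  apply PySem.List.sorted_eq_of_perm_of_pairwise_lt
  · have hnd1 : ((PySem.List.pyRange 0 ((p.length : Int) - (crib.length : Int) + 1) 1).filter
          (fun i => decide (0 < pvMC p crib i))).Nodup :=
      ((PySem.List.pairwise_lt_pyRange_one _ _).sublist List.filter_sublist).imp ne_of_lt
    rw [List.perm_ext_iff_of_nodup hnd1 (PySem.Set.nodup_ofList _)]
    intro i
    rw [PySem.Set.mem_ofList, List.mem_filter, PySem.List.mem_pyRange_one]
    constructor
    · rintro ⟨⟨hlo, hhi⟩, hpos⟩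
      rw [← List.count_pos_iff, pvCount_all p crib i hlo (by omega)]
      simpa using hpos
    · intro hm
      obtain ⟨h0, h1⟩ := pvMem_all_valid p crib i hm
      refine ⟨⟨h0, by omega⟩, ?_⟩
      rw [← List.count_pos_iff, pvCount_all p crib i h0 h1] at hm
      simpa using hm
  · exact (PySem.List.pairwise_lt_pyRange_one _ _).sublist List.filter_sublist

-- the argmax fold ignores zero-score offsets once best ≥ 0, and never decreases best
theorem pvFold_filter (f : Int → Nat) (R : List Int) (st : Int × Int) (h : 0 ≤ st.1) :
    R.foldl (fun st i => if ((f i : Int)) > st.1 then ((f i : Int), i) else st) st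
      = (R.filter (fun i => decide (0 < f i))).foldl
          (fun st i => if ((f i : Int)) > st.1 then ((f i : Int), i) else st) st
    ∧ st.1 ≤ (R.foldl (fun st i => if ((f i : Int)) > st.1 then ((f i : Int), i) else st) st).1 := by
  induction R generalizing st with
  | nil => exact ⟨rfl, le_refl _⟩
  | cons x R ih =>
    simp only [List.foldl_cons, List.filter_cons]
    by_cases hx : 0 < f x
    · have hstep : 0 ≤ (if ((f x : Int)) > st.1 then ((f x : Int), x) else st).1 := by
        split_ifs with hgt
        · simp
        · exact h
      obtain ⟨e, hle⟩ := ih _ hstep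
      have hle' : st.1 ≤ (if ((f x : Int)) > st.1 then ((f x : Int), x) else st).1 := by
        split_ifs with hgt
        · exact le_of_lt hgt
        · exact le_refl _
      simp only [hx, decide_true, if_true, List.foldl_cons]
      exact ⟨e, le_trans hle' hle⟩
    · have hz : f x = 0 := by omega
      have hno : ¬ ((f x : Int) > st.1) := by rw [hz]; push_cast; omega
      simp only [hx, decide_false, if_neg hno]
      exact ih st h

theorem pvCrib_step (p crib : List Char) (st : Int × Int) (h : 0 ≤ st.1) :
    pvA_crib p st crib = pvB_crib p (pvB_pos p) st crib ∧ 0 ≤ (pvA_crib p st crib).1 := by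
  have hA : pvA_crib p st crib
      = (PySem.List.pyRange 0 ((p.length : Int) - (crib.length : Int) + 1) 1).foldl
          (fun st i => if ((pvMC p crib i : Int)) > st.1 then ((pvMC p crib i : Int), i) else st) st := by
    unfold pvA_crib
    apply PySem.List.foldl_congr_mem
    intro st i _
    rw [pvMatches_eq]
  have hB : pvB_crib p (pvB_pos p) st crib
      = ((PySem.List.pyRange 0 ((p.length : Int) - (crib.length : Int) + 1) 1).filter
          (fun i => decide (0 < pvMC p crib i))).foldl
          (fun st i => if ((pvMC p crib i : Int)) > st.1 then ((pvMC p crib i : Int), i) else st) st := by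
    show (PySem.List.sorted (pvB_counts p (pvB_pos p) crib).keys (fun x => x) false).foldl
        (fun st off => if (pvB_counts p (pvB_pos p) crib).getD off 0 > st.1
          then ((pvB_counts p (pvB_pos p) crib).getD off 0, off) else st) st = _
    rw [pvSortedKeys_eq]
    apply PySem.List.foldl_congr_mem
    intro st off hoff
    rw [List.mem_filter, PySem.List.mem_pyRange_one] at hoff
    obtain ⟨⟨hlo, hhi⟩, _⟩ := hoff
    rw [pvCounts_getD, pvCount_all p crib off hlo (by omega)]
  obtain ⟨e, hle⟩ := pvFold_filter (pvMC p crib) _ st h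
  exact ⟨by rw [hA, hB, ← e], by rw [hA]; omega⟩

-- ===== VERDICT (by name: the statement is the Claim_ definition above) =====
theorem free_crib_score_spec : Claim_equal_free_crib_score := by
  intro plaintext _
  unfold Spec_free_crib_score free_crib_score free_crib_score_alt
  simp only [List.foldl]
  obtain ⟨e1, h1⟩ := pvCrib_step plaintext.toList "EASTNORTHEAST".toList (0, -1) (by norm_num)
  obtain ⟨e2, _⟩ := pvCrib_step plaintext.toList "BERLINCLOCK".toList _ h1
  rw [← e1, ← e2]
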